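-- pv_equiv track=rewrite | github.com/SivaKumarValluri/8B.Tracking-Emission-in-High-speed-Images-within-ROI-in-Shock-Compressed-Sample | Palantíri.py | populate_entries
-- ===== SOURCE A (Python) =====
-- def populate_entries(delays, exposures):
--     if len(delays) == 8 and len(exposures) == 8:
--         return delays, exposures
--     elif len(delays) == 1 and len(exposures) == 8:
--         delays = [delays[0] + sum(exposures[:i]) for i in range(8)]
--         return delays, exposures
--     elif len(exposures) == 1 and len(delays) == 8:
--         exposures = exposures * 8
--         return delays, exposures
--     elif len(delays) == 1 and len(exposures) == 1:
--         delays = [delays[0] + i * exposures[0] for i in range(8)]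
--         exposures = exposures * 8
--         return delays, exposures
--     else:
--         raise ValueError("Invalid number of entries for delays and exposures. They must be either 1 or 8 items each.")
-- ===== SOURCE B (Python) =====
-- def populate_entries(delays, exposures):
--     if len(delays) not in (1, 8) or len(exposures) not in (1, 8):
--         raise ValueError("Invalid number of entries for delays and exposures. They must be either 1 or 8 items each.")
--     if len(exposures) == 1:
--         exposures = exposures * 8
--     if len(delays) == 1:
--         out, acc = [], 0
--         for e in exposures:
--             out.append(delays[0] + acc)
--             acc += e
--         delays = out
--     return delays, exposures
-- ===== Notes on version B (the rewrite author's own statement) =====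
-- stated objective: simpler
-- what changed: Replaced A's four explicit length-combination branches (each with its own comprehension/slice-sum formula) by a normalize-then-compute flow: validate lengths once, replicate a single exposure to 8, then build the delays with one running-accumulator loop over the expanded exposures.
import Mathlib
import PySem

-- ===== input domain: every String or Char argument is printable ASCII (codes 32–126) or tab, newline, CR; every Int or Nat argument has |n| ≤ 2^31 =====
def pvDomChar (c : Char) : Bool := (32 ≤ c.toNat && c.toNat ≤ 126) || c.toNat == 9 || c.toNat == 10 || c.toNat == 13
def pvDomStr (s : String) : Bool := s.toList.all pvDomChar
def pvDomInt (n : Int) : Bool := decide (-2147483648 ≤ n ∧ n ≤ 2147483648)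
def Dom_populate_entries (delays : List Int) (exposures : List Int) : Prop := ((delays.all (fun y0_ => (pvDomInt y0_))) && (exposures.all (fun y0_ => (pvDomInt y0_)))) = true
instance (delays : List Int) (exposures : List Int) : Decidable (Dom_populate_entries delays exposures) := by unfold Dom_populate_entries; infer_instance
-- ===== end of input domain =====

-- B collapses A's four length-combination branches into validate, then normalize exposures, then one accumulator pass for delays.

-- ===== PORT A =====
-- Four branches exactly as in A; the final 'raise ValueError' branch is excluded by Pre_ (the port returns ([], []) there).
def populate_entries (delays : List Int) (exposures : List Int) : List Int × List Int :=
  if delays.length = 8 ∧ exposures.length = 8 then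
    (delays, exposures)
  else if delays.length = 1 ∧ exposures.length = 8 then
    ((PySem.List.pyRange 0 8 1).map
       (fun i => PySem.List.pyGetD delays 0 0 + (PySem.List.slice exposures none (some i)).sum),
     exposures)
  else if exposures.length = 1 ∧ delays.length = 8 then
    (delays, exposures ++ exposures ++ exposures ++ exposures ++ exposures ++ exposures ++ exposures ++ exposures)
  else if delays.length = 1 ∧ exposures.length = 1 then
    ((PySem.List.pyRange 0 8 1).map
       (fun i => PySem.List.pyGetD delays 0 0 + i * PySem.List.pyGetD exposures 0 0),
     exposures ++ exposures ++ exposures ++ exposures ++ exposures ++ exposures ++ exposures ++ exposures)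
  else
    ([], [])  -- raise ValueError: excluded by Pre_

-- ===== PORT B =====
-- The accumulator loop 'out, acc = [], 0; for e in exposures: out.append(delays[0]+acc); acc += e'
def pvAccLoop (d0 : Int) (exps : List Int) : List Int × Int :=
  exps.foldl (fun st e => (st.1 ++ [d0 + st.2], st.2 + e)) ([], 0)

def populate_entries_alt (delays : List Int) (exposures : List Int) : List Int × List Int :=
  if ¬ ((delays.length = 1 ∨ delays.length = 8) ∧ (exposures.length = 1 ∨ exposures.length = 8)) then
    ([], [])  -- raise ValueError: excluded by Pre_
  else
    let exposures := if exposures.length = 1 then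
        exposures ++ exposures ++ exposures ++ exposures ++ exposures ++ exposures ++ exposures ++ exposures
      else exposures
    let delays := if delays.length = 1 then (pvAccLoop (PySem.List.pyGetD delays 0 0) exposures).1 else delays
    (delays, exposures)

-- ===== PRECONDITION & SPEC =====
-- Exactly the inputs on which A returns (otherwise it raises ValueError).
def Pre_populate_entries (delays : List Int) (exposures : List Int) : Prop :=
  (delays.length = 1 ∨ delays.length = 8) ∧ (exposures.length = 1 ∨ exposures.length = 8)
instance (delays : List Int) (exposures : List Int) : Decidable (Pre_populate_entries delays exposures) := by
  unfold Pre_populate_entries; infer_instance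

def pvWitness_populate_entries : List Int × List Int := ([5], [1, 2, 3, 4, 5, 6, 7, 8])

def Spec_populate_entries (delays : List Int) (exposures : List Int) (out : List Int × List Int) : Prop := out = populate_entries_alt delays exposures
instance (delays : List Int) (exposures : List Int) (out : List Int × List Int) : Decidable (Spec_populate_entries delays exposures out) := by unfold Spec_populate_entries; infer_instance

-- ===== CLAIM (what is proved, stated in full; the proofs are below) =====
def Claim_equal_populate_entries : Prop := ∀ (delays : List Int) (exposures : List Int), Dom_populate_entries delays exposures → Pre_populate_entries delays exposures → Spec_populate_entries delays exposures (populate_entries delays exposures)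

-- ===== LEMMAS AND PROOFS =====

-- ===== VERDICT (by name: the statement is the Claim_ definition above) =====
lemma pvLen8 (xs : List Int) (h : xs.length = 8) :
    ∃ a b c d e f g h', xs = [a,b,c,d,e,f,g,h'] := by
  rcases xs with _|⟨a,_|⟨b,_|⟨c,_|⟨d,_|⟨e,_|⟨f,_|⟨g,_|⟨h',rest⟩⟩⟩⟩⟩⟩⟩⟩ <;> simp_all

theorem populate_entries_spec : Claim_equal_populate_entries := by
  intro delays exposures _ hpre
  obtain ⟨hd, he⟩ := hpre
  unfold Spec_populate_entries populate_entries populate_entries_alt pvAccLoop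
  rcases hd with hd | hd <;> rcases he with he | he
  · -- (1,1)
    obtain ⟨d, rfl⟩ := List.length_eq_one_iff.mp hd
    obtain ⟨e, rfl⟩ := List.length_eq_one_iff.mp he
    simp [PySem.List.pyRange, PySem.List.pyGetD, List.foldl, List.range_succ]
    ring_nf
    norm_num
  · -- (1,8)
    obtain ⟨d, rfl⟩ := List.length_eq_one_iff.mp hd
    obtain ⟨e1,e2,e3,e4,e5,e6,e7,e8, rfl⟩ := pvLen8 _ he
    simp [PySem.List.pyRange, PySem.List.pyGetD, PySem.List.slice, List.foldl, List.range_succ,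
          PySem.List.clampIdx]
    ring_nf
    norm_num
  · -- (8,1)
    obtain ⟨e, rfl⟩ := List.length_eq_one_iff.mp he
    simp [hd]
  · -- (8,8)
    simp [hd, he]
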